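-- pv_equiv track=rewrite | github.com/edwingavis/Congressional-Communications | site_scraping/website_scraping.py | check_url
-- ===== SOURCE A (Python) =====
-- def check_url(url):
--     known = {"watch", "youtube", ".aspx", "#", ".pdf",
--              "user", "twitter", "facebook", "mailto",
--              ".jpg", ".png", ".bmp", ".jpeg", ".xls", "tel:",
--              "ical", "javascript", "action", "gallery", ".mp4"}
--     lowered = url.lower()
--     for v in known:
--         if v in lowered:
--             return True
--     return False
-- ===== SOURCE B (Python) =====
-- # Blocklist re-indexed by first character: one dict lookup per position of the
-- # lowered URL, then match only the tails of the tokens that start with that char.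
-- _INDEX = {
--     '#': [""],
--     '.': ["aspx", "pdf", "jpg", "png", "bmp", "jpeg", "xls", "mp4"],
--     'a': ["ction"],
--     'f': ["acebook"],
--     'g': ["allery"],
--     'i': ["cal"],
--     'j': ["avascript"],
--     'm': ["ailto"],
--     't': ["witter", "el:"],
--     'u': ["ser"],
--     'w': ["atch"],
--     'y': ["outube"],
-- }
--
--
-- def check_url(url):
--     lowered = url.lower()
--     for i, c in enumerate(lowered):
--         for tail in _INDEX.get(c, ()):
--             if lowered.startswith(tail, i + 1):
--                 return True
--     return False
-- ===== Notes on version B (the rewrite author's own statement) =====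
-- stated objective: alternative
-- what changed: A loops over the blocklist and runs a full substring-containment search of the lowered URL for every token; B pre-indexes the tokens by first character in a dict and makes a single position-major scan of the lowered URL, at each position looking up the current character and prefix-matching only the tails of the tokens that start with it.
import Mathlib
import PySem

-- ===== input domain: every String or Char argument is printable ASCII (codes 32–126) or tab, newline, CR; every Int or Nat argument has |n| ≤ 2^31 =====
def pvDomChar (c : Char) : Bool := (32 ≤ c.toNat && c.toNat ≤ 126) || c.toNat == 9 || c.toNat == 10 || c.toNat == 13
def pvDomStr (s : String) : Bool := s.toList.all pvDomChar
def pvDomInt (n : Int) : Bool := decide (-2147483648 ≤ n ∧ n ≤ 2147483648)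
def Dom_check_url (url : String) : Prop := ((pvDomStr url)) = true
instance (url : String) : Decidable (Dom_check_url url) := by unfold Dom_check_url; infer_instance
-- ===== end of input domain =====

-- B replaces A's per-token substring searches by a dict indexing the blocked tokens by their
-- first character and ONE position-major scan of the lowered URL (objective: alternative).

-- ===== PORT A =====
-- the set literal 'known', iterated element by element (any order gives the same result;
-- insertion order used here)
def knownA : List String :=
  ["watch", "youtube", ".aspx", "#", ".pdf",
   "user", "twitter", "facebook", "mailto",
   ".jpg", ".png", ".bmp", ".jpeg", ".xls", "tel:",
   "ical", "javascript", "action", "gallery", ".mp4"]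

-- 'for v in known: if v in lowered: return True' / 'return False'
def checkLoopA (lowered : String) : List String → Bool
  | [] => false
  | v :: rest => if PySem.Str.isIn v lowered then true else checkLoopA lowered rest

def check_url (url : String) : Bool :=
  let lowered := PySem.Str.lower url
  checkLoopA lowered knownA

-- ===== PORT B =====
-- the module-level dict literal _INDEX: first character ↦ tails of the tokens starting with it
def indexB : PySem.Dict Char (List (List Char)) :=
  PySem.Dict.mk
    [('#', [[]]),
     ('.', ["aspx".toList, "pdf".toList, "jpg".toList, "png".toList,
            "bmp".toList, "jpeg".toList, "xls".toList, "mp4".toList]),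
     ('a', ["ction".toList]),
     ('f', ["acebook".toList]),
     ('g', ["allery".toList]),
     ('i', ["cal".toList]),
     ('j', ["avascript".toList]),
     ('m', ["ailto".toList]),
     ('t', ["witter".toList, "el:".toList]),
     ('u', ["ser".toList]),
     ('w', ["atch".toList]),
     ('y', ["outube".toList])]

-- 'for i, c in enumerate(lowered): for tail in _INDEX.get(c, ()): if lowered.startswith(tail, i+1)':
-- recursion on the suffixes of lowered, one step per position i; at position i with suffix c :: t,
-- 'lowered.startswith(tail, i+1)' is exactly 'tail is a prefix of t'.
def scanB : List Char → Bool
  | [] => false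
  | c :: t =>
      if (PySem.Dict.getD indexB c []).any (fun tail => tail.isPrefixOf t) then true
      else scanB t

def check_url_alt (url : String) : Bool :=
  scanB (PySem.Str.lower url).toList

-- ===== PRECONDITION & SPEC =====
def Spec_check_url (url : String) (out : Bool) : Prop := out = check_url_alt url
instance (url : String) (out : Bool) : Decidable (Spec_check_url url out) := by unfold Spec_check_url; infer_instance

-- ===== CLAIM (what is proved, stated in full; the proofs are below) =====
def Claim_equal_check_url : Prop := ∀ (url : String), Dom_check_url url → Spec_check_url url (check_url url)

-- ===== LEMMAS AND PROOFS =====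

theorem checkLoopA_eq_true_iff (lowered : String) (l : List String) :
    checkLoopA lowered l = true ↔ ∃ v ∈ l, PySem.Str.isIn v lowered = true := by
  induction l with
  | nil => simp [checkLoopA]
  | cons v rest ih =>
    simp only [checkLoopA]
    split_ifs with h
    · exact iff_of_true rfl ⟨v, List.mem_cons_self, h⟩
    · rw [ih]
      constructor
      · rintro ⟨w, hw, hin⟩
        exact ⟨w, List.mem_cons_of_mem _ hw, hin⟩
      · rintro ⟨w, hw, hin⟩
        rcases List.mem_cons.mp hw with rfl | hw
        · exact absurd hin h
        · exact ⟨w, hw, hin⟩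

-- the indexing is correct: a first-char lookup followed by a tail match at position i is
-- exactly 'some blocked token is a prefix of the suffix at i'
theorem hit_iff (c : Char) (t : List Char) :
    ((PySem.Dict.getD indexB c []).any (fun tail => tail.isPrefixOf t)) = true ↔
      ∃ v ∈ knownA, v.toList.isPrefixOf (c :: t) = true := by
  rcases eq_or_ne c '#' with rfl | h1
  · simp [indexB, knownA, PySem.Dict.getD, PySem.Dict.get?]
  rcases eq_or_ne c '.' with rfl | h2
  · simp [indexB, knownA, PySem.Dict.getD, PySem.Dict.get?]
  rcases eq_or_ne c 'a' with rfl | h3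
  · simp [indexB, knownA, PySem.Dict.getD, PySem.Dict.get?]
  rcases eq_or_ne c 'f' with rfl | h4
  · simp [indexB, knownA, PySem.Dict.getD, PySem.Dict.get?]
  rcases eq_or_ne c 'g' with rfl | h5
  · simp [indexB, knownA, PySem.Dict.getD, PySem.Dict.get?]
  rcases eq_or_ne c 'i' with rfl | h6
  · simp [indexB, knownA, PySem.Dict.getD, PySem.Dict.get?]
  rcases eq_or_ne c 'j' with rfl | h7
  · simp [indexB, knownA, PySem.Dict.getD, PySem.Dict.get?]
  rcases eq_or_ne c 'm' with rfl | h8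
  · simp [indexB, knownA, PySem.Dict.getD, PySem.Dict.get?]
  rcases eq_or_ne c 't' with rfl | h9
  · simp [indexB, knownA, PySem.Dict.getD, PySem.Dict.get?]
  rcases eq_or_ne c 'u' with rfl | h10
  · simp [indexB, knownA, PySem.Dict.getD, PySem.Dict.get?]
  rcases eq_or_ne c 'w' with rfl | h11
  · simp [indexB, knownA, PySem.Dict.getD, PySem.Dict.get?]
  rcases eq_or_ne c 'y' with rfl | h12
  · simp [indexB, knownA, PySem.Dict.getD, PySem.Dict.get?]
  · simp [indexB, knownA, PySem.Dict.getD, PySem.Dict.get?,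
      Ne.symm h1, Ne.symm h2, Ne.symm h3, Ne.symm h4, Ne.symm h5, Ne.symm h6,
      Ne.symm h7, Ne.symm h8, Ne.symm h9, Ne.symm h10, Ne.symm h11, Ne.symm h12]

theorem scanB_eq_true_iff (s : List Char) :
    scanB s = true ↔ ∃ v ∈ knownA, ∃ j, v.toList <+: s.drop j := by
  induction s with
  | nil =>
    simp only [scanB, List.drop_nil]
    constructor
    · intro hfalse; cases hfalse
    · rintro ⟨v, hv, j, hpre⟩
      have hne : ∀ v ∈ knownA, v.toList ≠ [] := by decide
      exact absurd (List.prefix_nil.mp hpre) (hne v hv)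
  | cons c t ih =>
    simp only [scanB]
    split_ifs with hhit
    · simp only [true_iff]
      rcases (hit_iff c t).mp hhit with ⟨v, hv, hpre⟩
      exact ⟨v, hv, 0, by simpa using List.isPrefixOf_iff_prefix.mp hpre⟩
    · rw [ih]
      constructor
      · rintro ⟨v, hv, j, hpre⟩
        exact ⟨v, hv, j + 1, by simpa using hpre⟩
      · rintro ⟨v, hv, j, hpre⟩
        cases j with
        | zero =>
          exfalso
          exact hhit ((hit_iff c t).mpr
            ⟨v, hv, List.isPrefixOf_iff_prefix.mpr (by simpa using hpre)⟩)
        | succ j => exact ⟨v, hv, j, by simpa using hpre⟩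

-- ===== VERDICT (by name: the statement is the Claim_ definition above) =====
theorem check_url_spec : Claim_equal_check_url := by
  intro url _
  unfold Spec_check_url check_url check_url_alt
  rw [Bool.eq_iff_iff, checkLoopA_eq_true_iff, scanB_eq_true_iff]
  constructor
  · rintro ⟨v, hv, hin⟩
    refine ⟨v, hv, ?_⟩
    rw [PySem.Str.isIn_eq] at hin
    exact (PySem.Chars.exists_prefix_drop_iff_isIn _ _).mpr hin
  · rintro ⟨v, hv, hj⟩
    refine ⟨v, hv, ?_⟩
    rw [PySem.Str.isIn_eq]
    exact (PySem.Chars.exists_prefix_drop_iff_isIn _ _).mp hj
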